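-- pv_equiv track=rewrite | github.com/MarkArranz/nand2tetris | projects/06/assembler/instruction_translator.py | dest
-- ===== SOURCE A (Python) =====
-- def dest(instr: str) -> str:
--     """
--     Constructs a binary string by flipping the corresponding letter's
--     positional bit to 1 if the instruction string contains the letter:
--
--     Letter   || A | D | M
--     Bit Pos. || 0 | 0 | 0
--
--     """
--     dest_bits = 0b_000
--
--     for c in instr:
--         match c:
--             case "A":
--                 # Flip the 4 bit: 000 => 100
--                 dest_bits |= 1 << 2
--             case "D":
--                 # Flip the 2 bit: 000 => 010
--                 dest_bits |= 1 << 1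
--             case "M":
--                 # Flip the 0 bit: 000 => 001
--                 dest_bits |= 1 << 0
--             case _:
--                 pass
--
--     return format(dest_bits, "03b")
-- ===== SOURCE B (Python) =====
-- def dest(instr: str) -> str:
--     # Iterate over the fixed alphabet "ADM", probing the input with membership
--     # tests, instead of scanning the input and OR-ing positional bits.
--     return ''.join('1' if c in instr else '0' for c in "ADM")
-- ===== Notes on version B (the rewrite author's own statement) =====
-- stated objective: idiomatic
-- what changed: B iterates over the fixed three-letter alphabet testing membership of each letter in the input and emitting the bit characters directly, instead of A's per-character scan of the input that ORs positional bits into a mask and then formats it in binary.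
import Mathlib
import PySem

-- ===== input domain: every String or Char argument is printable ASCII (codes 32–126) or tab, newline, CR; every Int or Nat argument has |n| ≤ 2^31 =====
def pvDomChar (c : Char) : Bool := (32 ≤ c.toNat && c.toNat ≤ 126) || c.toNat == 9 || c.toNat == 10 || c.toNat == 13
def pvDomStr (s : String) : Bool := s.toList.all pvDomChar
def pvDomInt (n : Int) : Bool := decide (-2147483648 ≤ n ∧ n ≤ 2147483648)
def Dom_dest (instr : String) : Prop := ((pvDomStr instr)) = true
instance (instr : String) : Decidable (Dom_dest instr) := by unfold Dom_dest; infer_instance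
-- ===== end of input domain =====

-- B iterates over the fixed alphabet "ADM" with membership tests instead of A's bitmask scan over the input; equivalence proved for all strings.


-- ===== PORT A =====
-- one step of A's loop: the match on c OR-ing the positional bit
def destStep (acc : Nat) (c : Char) : Nat :=
  if c = 'A' then acc ||| (1 <<< 2)
  else if c = 'D' then acc ||| (1 <<< 1)
  else if c = 'M' then acc ||| (1 <<< 0)
  else acc

-- port of format(n, "03b"); exact for n < 8, which covers every value A's mask can take
def fmt3b (n : Nat) : String :=
  String.ofList [(if n / 4 % 2 = 1 then '1' else '0'),
             (if n / 2 % 2 = 1 then '1' else '0'),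
             (if n % 2 = 1 then '1' else '0')]

def dest (instr : String) : String :=
  fmt3b (instr.toList.foldl destStep 0)

-- ===== PORT B =====
def dest_alt (instr : String) : String :=
  String.ofList (("ADM".toList).map (fun c => if instr.toList.contains c then '1' else '0'))

-- ===== PRECONDITION & SPEC =====
def Spec_dest (instr : String) (out : String) : Prop := out = dest_alt instr
instance (instr : String) (out : String) : Decidable (Spec_dest instr out) := by unfold Spec_dest; infer_instance

-- ===== CLAIM (what is proved, stated in full; the proofs are below) =====
def Claim_equal_dest : Prop := ∀ (instr : String), Dom_dest instr → Spec_dest instr (dest instr)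

-- ===== LEMMAS AND PROOFS =====

-- the value A's fold computes, characterised by membership of the three letters
def maskOf (l : List Char) : Nat :=
  (if 'A' ∈ l then 4 else 0) + (if 'D' ∈ l then 2 else 0) + (if 'M' ∈ l then 1 else 0)

theorem foldl_destStep (l : List Char) : ∀ acc : Nat, l.foldl destStep acc = acc ||| maskOf l := by
  induction l with
  | nil => intro acc; simp [maskOf]
  | cons c l ih =>
    intro acc
    simp only [List.foldl_cons, ih]
    by_cases hA' : 'A' ∈ l <;> by_cases hD' : 'D' ∈ l <;> by_cases hM' : 'M' ∈ l <;>
      by_cases hA : c = 'A' <;> by_cases hD : c = 'D' <;> by_cases hM : c = 'M' <;>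
        simp_all [destStep, maskOf, Nat.lor_assoc, @eq_comm Char]

-- ===== VERDICT (by name: the statement is the Claim_ definition above) =====
theorem dest_spec : Claim_equal_dest := by
  intro instr _
  unfold Spec_dest dest dest_alt
  rw [foldl_destStep]
  by_cases hA : 'A' ∈ instr.toList <;> by_cases hD : 'D' ∈ instr.toList <;>
    by_cases hM : 'M' ∈ instr.toList <;>
      simp [maskOf, hA, hD, hM, fmt3b]
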